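-- pv_equiv track=rewrite | github.com/RuiFSP/CodeWars | Python/6 kyu/rectangle_into_squares.py | sq_in_rect
-- ===== SOURCE A (Python) =====
-- from typing import List, Optional
--
-- def sq_in_rect(length: int, width: int) -> Optional[List[int]]:
--     """
--     Divides a "true" rectangle into squares of decreasing size.
--
--     Args:
--         length (int): The length of the rectangle.
--         width (int): The width of the rectangle.
--
--     Returns:
--         Optional[List[int]]: A list containing the sizes of each square, or None if the dimensions are the same.
--     """
--     if length == width:
--         return None
--
--     sizes = []
--     while length and width:
--         side = min(length, width)
--         sizes.append(side)
--         if length == side: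
--             width -= side
--         else:
--             length -= side
--     return sizes
-- ===== SOURCE B (Python) =====
-- from typing import List, Optional
--
-- def sq_in_rect(length: int, width: int) -> Optional[List[int]]:
--     if length == width:
--         return None
--     sizes = []
--     a, b = max(length, width), min(length, width)
--     while b:
--         sizes.extend([b] * (a // b))
--         a, b = b, a % b
--     return sizes
-- ===== Notes on version B (the rewrite author's own statement) =====
-- stated objective: faster
-- what changed: B replaces A's one-subtraction-per-square loop with a Euclidean-algorithm loop that emits each square size in a block of a//b copies and reduces via a%b; Pre_ excludes unequal inputs with a negative side and both sides nonzero, on which A's while loop never terminates.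
import Mathlib
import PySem

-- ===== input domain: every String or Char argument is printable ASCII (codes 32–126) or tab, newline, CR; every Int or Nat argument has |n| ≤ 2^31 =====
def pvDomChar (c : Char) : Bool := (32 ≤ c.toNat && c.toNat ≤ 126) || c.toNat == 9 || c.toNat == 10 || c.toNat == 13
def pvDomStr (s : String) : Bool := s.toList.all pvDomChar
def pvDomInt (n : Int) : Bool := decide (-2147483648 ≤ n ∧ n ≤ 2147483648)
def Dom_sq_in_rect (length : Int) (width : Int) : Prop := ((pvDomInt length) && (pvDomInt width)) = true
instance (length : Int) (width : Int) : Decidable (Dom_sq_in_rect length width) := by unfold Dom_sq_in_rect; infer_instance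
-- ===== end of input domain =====

-- B emits each square size in a block via Euclidean division (a//b copies, reduce by a%b)
-- instead of A's one-subtraction-per-square loop: asymptotically fewer iterations.


-- ===== PORT A =====
-- A's while loop, with fuel (one unit per iteration; length+width shrinks by ≥ 1
-- per iteration on the admitted inputs, so natAbs length + natAbs width suffices).
def sqLoopA : Nat → Int → Int → List Int → List Int
  | 0, _, _, sizes => sizes
  | Nat.succ f, length, width, sizes =>
    if length ≠ 0 ∧ width ≠ 0 then
      if length = min length width then
        sqLoopA f length (width - min length width) (sizes ++ [min length width])
      else sqLoopA f (length - min length width) width (sizes ++ [min length width])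
    else sizes

def sq_in_rect (length : Int) (width : Int) : Option (List Int) :=
  if length = width then none
  else some (sqLoopA (length.natAbs + width.natAbs) length width [])

-- ===== PORT B =====
-- B's Euclidean while loop, with fuel (b strictly shrinks each iteration on the
-- admitted inputs, so natAbs b + 1 suffices). [b] * (a // b) clamps a negative
-- count to the empty list, exactly as Python list repetition does.
def sqLoopB : Nat → Int → Int → List Int → List Int
  | 0, _, _, sizes => sizes
  | Nat.succ f, a, b, sizes =>
    if b ≠ 0 then
      sqLoopB f b (PySem.Int.mod a b)
        (sizes ++ List.replicate (PySem.Int.floordiv a b).toNat b)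
    else sizes

def sq_in_rect_alt (length : Int) (width : Int) : Option (List Int) :=
  if length = width then none
  else some (sqLoopB ((min length width).natAbs + 1) (max length width) (min length width) [])

-- ===== PRECONDITION & SPEC =====
-- Pre_ excludes the unequal inputs with a negative side and both sides nonzero:
-- there A's while loop never terminates (the subtraction moves the pair away from
-- zero), so A returns nothing.
def Pre_sq_in_rect (length : Int) (width : Int) : Prop :=
  length = width ∨ length = 0 ∨ width = 0 ∨ (0 ≤ length ∧ 0 ≤ width)
instance (length : Int) (width : Int) : Decidable (Pre_sq_in_rect length width) := by
  unfold Pre_sq_in_rect; infer_instance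
def pvWitness_sq_in_rect : Int × Int := (5, 3)

def Spec_sq_in_rect (length : Int) (width : Int) (out : Option (List Int)) : Prop := out = sq_in_rect_alt length width
instance (length : Int) (width : Int) (out : Option (List Int)) : Decidable (Spec_sq_in_rect length width out) := by unfold Spec_sq_in_rect; infer_instance

-- ===== CLAIM (what is proved, stated in full; the proofs are below) =====
def Claim_equal_sq_in_rect : Prop := ∀ (length : Int) (width : Int), Dom_sq_in_rect length width → Pre_sq_in_rect length width → Spec_sq_in_rect length width (sq_in_rect length width)

-- ===== LEMMAS AND PROOFS =====

-- Common characterisation: the list of square sizes of the (sorted) pair a ≥ b.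
def sqG (a b : Int) : List Int :=
  if h : 0 < b ∧ b ≤ a then
    List.replicate (PySem.Int.floordiv a b).toNat b ++ sqG b (PySem.Int.mod a b)
  else []
termination_by b.toNat
decreasing_by
  have hb := h.1
  have h1 : PySem.Int.mod a b = a % b := PySem.Int.mod_eq_emod_of_pos hb
  have h3 : a % b < b := Int.emod_lt_of_pos a hb
  omega

theorem sqG_step (a b : Int) (hb : 0 < b) (hba : b ≤ a) :
    sqG a b = b :: sqG (max (a - b) b) (min (a - b) b) := by
  rw [sqG]
  rw [dif_pos ⟨hb, hba⟩]
  rw [PySem.Int.mod_eq_emod_of_pos hb, PySem.Int.floordiv_eq_ediv_of_pos hb]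
  have e : a - b + 1 * b = a := by ring
  have hqd := Int.add_mul_ediv_right (a - b) 1 (show b ≠ 0 by omega)
  rw [e] at hqd
  have hmd : a % b = (a - b) % b := (Int.sub_emod_right a b).symm
  by_cases hcase : b ≤ a - b
  · -- a ≥ 2b : peel one copy of b off the replicate block
    rw [max_eq_left (by omega), min_eq_right (by omega)]
    conv_rhs => rw [sqG, dif_pos ⟨hb, hcase⟩]
    rw [PySem.Int.mod_eq_emod_of_pos hb, PySem.Int.floordiv_eq_ediv_of_pos hb]
    have hqpos : 0 ≤ (a - b) / b := Int.ediv_nonneg (by omega) (by omega)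
    rw [hqd, hmd]
    have ht : ((a - b) / b + 1).toNat = ((a - b) / b).toNat + 1 := by omega
    rw [ht, List.replicate_succ]
    simp
  · -- b ≤ a < 2b : the quotient is 1 and the remainder is a - b
    have h0 : (a - b) / b = 0 := Int.ediv_eq_zero_of_lt (by omega) (by omega)
    have hm0 : (a - b) % b = a - b := Int.emod_eq_of_lt (by omega) (by omega)
    rw [max_eq_right (by omega), min_eq_left (by omega), hqd, hmd, h0, hm0]
    norm_num

theorem sqG_zero (a b : Int) (hb : b ≤ 0) : sqG a b = [] := by
  rw [sqG, dif_neg]; omega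

theorem sqLoopA_eq_sqG (n : Nat) :
    ∀ (l w : Int) (acc : List Int), 0 ≤ l → 0 ≤ w → l.toNat + w.toNat ≤ n →
      sqLoopA n l w acc = acc ++ sqG (max l w) (min l w) := by
  induction n with
  | zero =>
    intro l w acc hl hw hn
    have h0 : l = 0 ∧ w = 0 := by omega
    obtain ⟨h1, h2⟩ := h0
    subst h1; subst h2
    rw [sqLoopA, sqG_zero _ _ (by omega : min (0 : Int) 0 ≤ 0), List.append_nil]
  | succ n ih =>
    intro l w acc hl hw hn
    rw [sqLoopA]
    by_cases hg : l ≠ 0 ∧ w ≠ 0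
    · have hlp : 0 < l := by omega
      have hwp : 0 < w := by omega
      rw [if_pos hg]
      by_cases hlw : l ≤ w
      · -- l is the min: subtract l from w
        simp only [min_eq_left hlw, max_eq_right hlw]
        rw [ih l (w - l) (acc ++ [l]) hl (by omega) (by omega)]
        rw [sqG_step w l hlp hlw, max_comm, min_comm]
        simp
      · -- w is the min: subtract w from l
        have hwl : w ≤ l := by omega
        simp only [min_eq_right hwl, max_eq_left hwl, if_neg (show ¬ l = w by omega)]
        rw [ih (l - w) w (acc ++ [w]) (by omega) hw (by omega)]
        rw [sqG_step l w hwp hwl]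
        simp
    · rw [if_neg hg]
      have hmin : min l w ≤ 0 := by
        rcases (show l = 0 ∨ w = 0 by tauto) with h | h <;> simp [h]
      rw [sqG_zero _ _ hmin, List.append_nil]

theorem sqLoopB_eq_sqG (n : Nat) :
    ∀ (a b : Int) (acc : List Int), 0 ≤ b → b ≤ a → b.toNat < n →
      sqLoopB n a b acc = acc ++ sqG a b := by
  induction n with
  | zero => intro a b acc _ _ hn; omega
  | succ n ih =>
    intro a b acc hb hba hn
    rw [sqLoopB]
    by_cases h0 : b = 0
    · rw [if_neg (by simp [h0]), sqG_zero _ _ (by omega), List.append_nil]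
    · have hbp : 0 < b := by omega
      rw [if_pos h0]
      have hm : PySem.Int.mod a b = a % b := PySem.Int.mod_eq_emod_of_pos hbp
      have hm1 : 0 ≤ a % b := Int.emod_nonneg a (by omega)
      have hm2 : a % b < b := Int.emod_lt_of_pos a hbp
      rw [ih b (PySem.Int.mod a b) _ (by omega) (by omega) (by omega)]
      conv_rhs => rw [sqG, dif_pos ⟨hbp, hba⟩]
      simp

theorem sqLoopA_left_zero (n : Nat) (w : Int) (acc : List Int) :
    sqLoopA n 0 w acc = acc := by
  cases n <;> simp [sqLoopA]

theorem sqLoopA_right_zero (n : Nat) (l : Int) (acc : List Int) :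
    sqLoopA n l 0 acc = acc := by
  cases n <;> simp [sqLoopA]

theorem sqLoopB_right_zero (n : Nat) (a : Int) (acc : List Int) :
    sqLoopB n a 0 acc = acc := by
  cases n <;> simp [sqLoopB]

theorem sqLoopB_left_zero (n : Nat) (b : Int) (acc : List Int) :
    sqLoopB (n + 2) 0 b acc = acc := by
  rw [sqLoopB]
  by_cases hb : b = 0
  · simp [hb]
  · rw [if_pos hb]
    have h1 : PySem.Int.floordiv 0 b = 0 := by simp [PySem.Int.floordiv]
    have h2 : PySem.Int.mod 0 b = 0 := by simp [PySem.Int.mod]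
    rw [h1, h2]
    simp [sqLoopB_right_zero]

theorem sq_in_rect_spec : Claim_equal_sq_in_rect := by
  intro l w _ hpre
  unfold Spec_sq_in_rect sq_in_rect sq_in_rect_alt
  by_cases heq : l = w
  · simp [heq]
  · rw [if_neg heq, if_neg heq]
    by_cases hnn : 0 ≤ l ∧ 0 ≤ w
    · obtain ⟨hl, hw⟩ := hnn
      rw [sqLoopA_eq_sqG _ l w [] hl hw (by omega)]
      rcases le_total l w with h | h
      · rw [min_eq_left h, max_eq_right h] at *
        rw [sqLoopB_eq_sqG _ w l [] hl h (by omega)]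
      · rw [min_eq_right h, max_eq_left h] at *
        rw [sqLoopB_eq_sqG _ l w [] hw h (by omega)]
    · -- one side is zero, the other negative: both loops emit nothing
      have hz : l = 0 ∨ w = 0 := by
        rcases hpre with h | h | h | h
        · exact absurd h heq
        · exact Or.inl h
        · exact Or.inr h
        · exact absurd h hnn
      rcases hz with h | h
      · subst h
        have hw0 : w < 0 := by omega
        rw [sqLoopA_left_zero]
        rw [min_eq_right (by omega : w ≤ (0:Int)), max_eq_left (by omega : w ≤ (0:Int))]
        obtain ⟨k, hk⟩ : ∃ k, w.natAbs + 1 = k + 2 := ⟨w.natAbs - 1, by omega⟩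
        rw [hk, sqLoopB_left_zero]
      · subst h
        have hl0 : l < 0 := by omega
        rw [sqLoopA_right_zero]
        rw [min_eq_left (by omega : l ≤ (0:Int)), max_eq_right (by omega : l ≤ (0:Int))]
        obtain ⟨k, hk⟩ : ∃ k, l.natAbs + 1 = k + 2 := ⟨l.natAbs - 1, by omega⟩
        rw [hk, sqLoopB_left_zero]
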